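-- pv_equiv track=rewrite | github.com/Jaswant-2525/Information-Extraction-From-Research-Papers | project/backend.py | extract_core_sections
-- ===== SOURCE A (Python) =====
-- def extract_core_sections(text):
--     sections = {"abstract": "", "introduction": "", "methodology": "", "results": "", "conclusion": ""}
--     lower_text = text.lower()
--     for section in sections.keys():
--         index = lower_text.find(section)
--         if index != -1:
--             next_section_index = min([
--                 lower_text.find(s, index + len(section)) for s in sections if lower_text.find(s, index + len(section)) != -1
--             ] + [len(text)])
--             sections[section] = text[index:next_section_index].strip()
--     return sections
-- ===== SOURCE B (Python) =====
-- def extract_core_sections(text):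
--     names = ["abstract", "introduction", "methodology", "results", "conclusion"]
--     low = text.lower()
--     # one pass over all positions: every position where ANY keyword starts
--     occ = [i for i in range(len(low)) if any(low.startswith(n, i) for n in names)]
--     result = {}
--     for name in names:
--         start = next((i for i in occ if low.startswith(name, i)), -1)
--         if start == -1:
--             result[name] = ""
--         else:
--             end = next((p for p in occ if p >= start + len(name)), len(text))
--             result[name] = text[start:end].strip()
--     return result
-- ===== Notes on version B (the rewrite author's own statement) =====
-- stated objective: alternative
-- what changed: A scans with repeated str.find and a per-section min over five fresh finds; B builds one ascending index of all positions where any keyword starts (a single position scan with startswith) and answers each section's start and end by taking the first matching entry of that index.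
import Mathlib
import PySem

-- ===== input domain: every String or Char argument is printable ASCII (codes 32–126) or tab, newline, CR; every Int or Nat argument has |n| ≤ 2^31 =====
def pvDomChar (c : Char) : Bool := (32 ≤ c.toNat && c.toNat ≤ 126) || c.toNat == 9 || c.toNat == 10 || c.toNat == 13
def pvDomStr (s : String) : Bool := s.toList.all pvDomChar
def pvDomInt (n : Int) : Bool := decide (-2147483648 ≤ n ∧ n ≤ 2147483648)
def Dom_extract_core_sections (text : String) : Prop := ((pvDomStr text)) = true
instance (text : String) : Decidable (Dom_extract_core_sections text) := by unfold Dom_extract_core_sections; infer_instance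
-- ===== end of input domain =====

-- B replaces A's repeated str.find scans and per-section min over five fresh finds by one
-- ascending index of all keyword-start positions, answered by first-match lookups (alternative
-- decomposition, same asymptotic class).

-- ===== PORT A =====
def aNames : List String := ["abstract", "introduction", "methodology", "results", "conclusion"]

def extract_core_sections (text : String) : List (String × String) :=
  let lower_text := PySem.Str.lower text
  -- the dict has these five fixed keys; the loop assigns each key (in order) its final value,
  -- so the returned dict is this map over the keys in insertion order
  aNames.map (fun sec =>
    let index := PySem.Str.find lower_text sec
    if index ≠ -1 then
      let cands := aNames.filterMap (fun s =>
        if PySem.Str.findFrom lower_text s (index + PySem.Str.len sec) none ≠ -1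
        then some (PySem.Str.findFrom lower_text s (index + PySem.Str.len sec) none)
        else none)
      -- min([...] + [len(text)]): the list is nonempty, so the getD default is never read
      let next_section_index := (PySem.List.min? (cands ++ [PySem.Str.len text]) (fun x => x)).getD 0
      (sec, PySem.Str.strip (PySem.Str.slice text (some index) (some next_section_index)))
    else (sec, ""))

-- ===== PORT B =====
def bNames : List String := ["abstract", "introduction", "methodology", "results", "conclusion"]

-- low.startswith(n, i): exact for 0 ≤ i ≤ len(low) (the only calls B makes), as prefix of the dropped tail
def bStartsAt (low : List Char) (n : String) (i : Int) : Bool :=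
  PySem.Chars.startswith (low.drop i.toNat) n.toList

def extract_core_sections_alt (text : String) : List (String × String) :=
  let low := PySem.Str.lower text
  -- occ = [i for i in range(len(low)) if any(low.startswith(n, i) for n in names)]
  let occ := (PySem.List.pyRange 0 (PySem.Str.len low)).filter
      (fun i => bNames.any (fun n => bStartsAt low.toList n i))
  bNames.map (fun name =>
    -- next((i for i in occ if low.startswith(name, i)), -1)
    let start := (occ.find? (fun i => bStartsAt low.toList name i)).getD (-1)
    if start = -1 then (name, "")
    else
      -- next((p for p in occ if p >= start + len(name)), len(text))
      let e := (occ.find? (fun p => start + PySem.Str.len name ≤ p)).getD (PySem.Str.len text)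
      (name, PySem.Str.strip (PySem.Str.slice text (some start) (some e))))

-- ===== PRECONDITION & SPEC =====
def Spec_extract_core_sections (text : String) (out : List (String × String)) : Prop := out = extract_core_sections_alt text
instance (text : String) (out : List (String × String)) : Decidable (Spec_extract_core_sections text out) := by unfold Spec_extract_core_sections; infer_instance

-- ===== CLAIM (what is proved, stated in full; the proofs are below) =====
def Claim_equal_extract_core_sections : Prop := ∀ (text : String), Dom_extract_core_sections text → Spec_extract_core_sections text (extract_core_sections text)

-- ===== LEMMAS AND PROOFS =====

-- every keyword is a nonempty string
lemma bNames_ne_nil : ∀ n ∈ bNames, n.toList ≠ [] := by decide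

lemma aNames_eq_bNames : aNames = bNames := rfl

-- B's occurrence index, abstracted over the lowered character list
def occL (L : List Char) : List Int :=
  (PySem.List.pyRange 0 (↑L.length)).filter (fun i => bNames.any (fun n => bStartsAt L n i))

lemma occL_pairwise (L : List Char) : (occL L).Pairwise (· < ·) :=
  List.Pairwise.filter _ (PySem.List.pairwise_lt_pyRange_one 0 _)

lemma mem_occL {L : List Char} {i : Int} :
    i ∈ occL L ↔ (0 ≤ i ∧ i < ↑L.length ∧ ∃ n ∈ bNames, n.toList <+: L.drop i.toNat) := by
  simp [occL, List.mem_filter, PySem.List.mem_pyRange_one, bStartsAt,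
    List.any_eq_true, PySem.Chars.startswith_iff, and_assoc]

-- a position where a keyword starts is strictly inside L
lemma hit_lt_len {L : List Char} {n : String} (hn : n ∈ bNames) {k : Nat}
    (h : n.toList <+: L.drop k) : k < L.length := by
  have hne := bNames_ne_nil n hn
  have h1 : n.toList.length ≤ (L.drop k).length := h.length_le
  have h2 : 0 < n.toList.length := List.length_pos_iff.mpr hne
  rw [List.length_drop] at h1
  omega

lemma natCast_mem_occL {L : List Char} {n : String} (hn : n ∈ bNames) {k : Nat}
    (h : n.toList <+: L.drop k) : (↑k : Int) ∈ occL L := by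
  refine mem_occL.mpr ⟨by positivity, ?_, n, hn, by simpa using h⟩
  exact_mod_cast hit_lt_len hn h

-- first match of find? on a strictly ascending list is the minimal match
lemma find?_sorted_min {p : Int → Bool} {l : List Int} (hl : l.Pairwise (· < ·)) {x : Int}
    (h : l.find? p = some x) : ∀ y ∈ l, p y = true → x ≤ y := by
  induction l with
  | nil => simp at h
  | cons a t ih =>
    rw [List.find?_cons] at h
    by_cases hpa : p a = true
    · simp [hpa] at h
      subst h
      intro y hy _
      rcases List.mem_cons.1 hy with rfl | hy
      · exact le_refl _
      · exact le_of_lt (List.rel_of_pairwise_cons hl hy)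
    · simp [hpa] at h
      intro y hy hpy
      rcases List.mem_cons.1 hy with rfl | hy
      · exact absurd hpy hpa
      · exact ih (List.Pairwise.of_cons hl) h y hy hpy

-- B's start lookup computes exactly lower.find(name)
lemma start_eq {L : List Char} {n : String} (hn : n ∈ bNames) :
    ((occL L).find? (fun i => bStartsAt L n i)).getD (-1) = PySem.Chars.find L n.toList := by
  by_cases hf : PySem.Chars.find L n.toList = -1
  · have hno : ¬ n.toList <:+: L := (PySem.Chars.find_eq_neg_one_iff L n.toList).mp hf
    have : (occL L).find? (fun i => bStartsAt L n i) = none := by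
      rw [List.find?_eq_none]
      intro i hi hb
      have : n.toList <+: L.drop i.toNat := by
        simp only [bStartsAt, PySem.Chars.startswith_iff] at hb
        exact hb
      have hin : PySem.Chars.isIn n.toList L = true :=
        (PySem.Chars.exists_prefix_drop_iff_isIn n.toList L).mp ⟨_, this⟩
      exact hno ((PySem.Chars.isIn_iff_infix n.toList L).mp hin)
    rw [this, hf]; rfl
  · -- r := find L n, the minimal position with n a prefix
    have hz : PySem.Chars.findFrom L n.toList (↑(0:Nat)) = PySem.Chars.find L n.toList := by
      simp
    have hspec := PySem.Chars.findFrom_natCast_spec L n.toList 0 (Nat.zero_le _) (by rw [hz]; exact hf)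
    rw [hz] at hspec
    obtain ⟨hr0, hrpre, hrmin⟩ := hspec
    set r := PySem.Chars.find L n.toList with hrdef
    have hr0' : (0:Int) ≤ r := by exact_mod_cast hr0
    have hrmem : r ∈ occL L := by
      have := natCast_mem_occL hn hrpre
      rwa [Int.toNat_of_nonneg hr0'] at this
    have hrp : bStartsAt L n r = true := by
      simp [bStartsAt, PySem.Chars.startswith_iff, hrpre]
    cases hfind : (occL L).find? (fun i => bStartsAt L n i) with
    | none =>
      exact absurd hrp (List.find?_eq_none.mp hfind r hrmem)
    | some x =>
      have hxmem := List.mem_of_find?_eq_some hfind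
      have hxp := List.find?_some hfind
      have hx0 : (0:Int) ≤ x := (mem_occL.mp hxmem).1
      have hxpre : n.toList <+: L.drop x.toNat := by
        simpa [bStartsAt, PySem.Chars.startswith_iff] using hxp
      have h1 : x ≤ r := find?_sorted_min (occL_pairwise L) hfind r hrmem hrp
      have h2 : r ≤ x := by
        by_contra hlt
        push Not at hlt
        exact hrmin x.toNat (Nat.zero_le _) (by omega) hxpre
      simp only [Option.getD_some]
      exact le_antisymm h1 h2

-- B's end lookup computes exactly A's min over the five findFroms (plus len)
lemma end_eq {L : List Char} (m : Nat) (hm : m ≤ L.length) :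
    ((occL L).find? (fun p => (↑m : Int) ≤ p)).getD (↑L.length)
      = (PySem.List.min? ((bNames.filterMap (fun s =>
            if PySem.Chars.findFrom L s.toList (↑m) ≠ -1
            then some (PySem.Chars.findFrom L s.toList (↑m)) else none)) ++ [(↑L.length : Int)])
          (fun x => x)).getD 0 := by
  set f : String → Option Int := fun s =>
    if PySem.Chars.findFrom L s.toList (↑m) ≠ -1
    then some (PySem.Chars.findFrom L s.toList (↑m)) else none with hf
  set cands := bNames.filterMap f with hcands
  -- a successful findFrom lands in occ, at or after m
  have hff : ∀ s ∈ bNames, PySem.Chars.findFrom L s.toList (↑m) ≠ -1 →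
      PySem.Chars.findFrom L s.toList (↑m) ∈ occL L ∧ (↑m : Int) ≤ PySem.Chars.findFrom L s.toList (↑m) := by
    intro s hs hq
    obtain ⟨hj0, hjpre, hjmin⟩ := PySem.Chars.findFrom_natCast_spec L s.toList m hm hq
    have hj0' : (0:Int) ≤ PySem.Chars.findFrom L s.toList (↑m) := le_trans (by positivity) hj0
    refine ⟨?_, hj0⟩
    have := natCast_mem_occL hs hjpre
    rwa [Int.toNat_of_nonneg hj0'] at this
  cases h : (occL L).find? (fun p => (↑m : Int) ≤ p) with
  | none =>
    -- nothing at or after m: every findFrom fails, so cands = [] and both sides are len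
    have hnone := List.find?_eq_none.mp h
    have hc : cands = [] := by
      rw [hcands, List.filterMap_eq_nil_iff]
      intro s hs
      rw [hf]
      simp only [ite_eq_right_iff]
      intro hq
      exact absurd (by simp [(hff s hs hq).2]) (hnone _ (hff s hs hq).1)
    rw [hc]
    cases hv : PySem.List.min? ([] ++ [(↑L.length : Int)]) (fun x => x) with
    | none => exact absurd ((PySem.List.min?_eq_none_iff _ _).mp hv) (by simp)
    | some v =>
      have := PySem.List.min?_mem hv
      simp at this
      simp [this]
  | some x =>
    have hxmem := List.mem_of_find?_eq_some h
    have hxp : (↑m : Int) ≤ x := by simpa using List.find?_some h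
    obtain ⟨hx0, hxlt, s, hs, hxpre⟩ := mem_occL.mp hxmem
    -- the keyword s seen at x makes findFrom succeed, and it returns exactly x
    have hinf : s.toList <:+: L.drop m := by
      have hpre' : s.toList <+: (L.drop m).drop (x.toNat - m) := by
        rw [List.drop_drop]
        have he : m + (x.toNat - m) = x.toNat := by omega
        rw [he]
        exact hxpre
      exact hpre'.isInfix.trans (List.drop_suffix _ _).isInfix
    have hq : PySem.Chars.findFrom L s.toList (↑m) ≠ -1 := by
      intro hq
      exact ((PySem.Chars.findFrom_natCast_eq_neg_one_iff L s.toList m hm).mp hq) hinf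
    obtain ⟨hj0, hjpre, hjmin⟩ := PySem.Chars.findFrom_natCast_spec L s.toList m hm hq
    obtain ⟨hjmem, hjge⟩ := hff s hs hq
    have hxj : x ≤ PySem.Chars.findFrom L s.toList (↑m) :=
      find?_sorted_min (occL_pairwise L) h _ hjmem (by simp [hjge])
    have hjx : PySem.Chars.findFrom L s.toList (↑m) ≤ x := by
      by_contra hlt
      push Not at hlt
      exact hjmin x.toNat (by omega) (by omega) hxpre
    have hjeq : PySem.Chars.findFrom L s.toList (↑m) = x := le_antisymm hjx hxj
    have hxc : x ∈ cands := by
      rw [hcands, List.mem_filterMap]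
      refine ⟨s, hs, ?_⟩
      show (if PySem.Chars.findFrom L s.toList (↑m) ≠ -1
            then some (PySem.Chars.findFrom L s.toList (↑m)) else none) = some x
      rw [if_pos hq, hjeq]
    cases hv : PySem.List.min? (cands ++ [(↑L.length : Int)]) (fun x => x) with
    | none =>
      have := (PySem.List.min?_eq_none_iff _ _).mp hv
      simp at this
    | some v =>
      have hvle := PySem.List.min?_id_le hv
      have hvmem := PySem.List.min?_mem hv
      have hvx : v ≤ x := hvle x (by simp [hxc])
      have hxv : x ≤ v := by
        rcases List.mem_append.1 hvmem with hvc | hvl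
        · -- v is some successful findFrom: it lies in occ at or after m, so the first such, x, is ≤ v
          rw [hcands, List.mem_filterMap] at hvc
          obtain ⟨s', hs', hfs'⟩ := hvc
          rw [hf] at hfs'
          beta_reduce at hfs'
          by_cases hq' : PySem.Chars.findFrom L s'.toList (↑m) ≠ -1
          · rw [if_pos hq'] at hfs'
            have hveq := Option.some.inj hfs'
            obtain ⟨hmem', hge'⟩ := hff s' hs' hq'
            rw [hveq] at hmem' hge'
            exact find?_sorted_min (occL_pairwise L) h v hmem' (by simp [hge'])
          · rw [if_neg hq'] at hfs'
            exact absurd hfs' (by simp)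
        · simp at hvl
          omega
      simp [le_antisymm hvx hxv]

-- lower() preserves length
lemma lower_length (text : String) : (PySem.Str.lower text).toList.length = text.toList.length := by
  rw [PySem.Str.toList_lower]
  simp [PySem.Chars.lower]

-- ===== VERDICT (by name: the statement is the Claim_ definition above) =====
theorem extract_core_sections_spec : Claim_equal_extract_core_sections := by
  intro text _
  unfold Spec_extract_core_sections extract_core_sections extract_core_sections_alt
  simp only [aNames_eq_bNames]
  have hocc : (PySem.List.pyRange 0 (PySem.Str.len (PySem.Str.lower text))).filter
      (fun i => bNames.any (fun n => bStartsAt (PySem.Str.lower text).toList n i))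
      = occL (PySem.Str.lower text).toList := by
    rw [PySem.Str.len_eq]
    rfl
  rw [hocc]
  refine List.map_congr_left ?_
  intro n hn
  set L := (PySem.Str.lower text).toList with hLdef
  have hlen : L.length = text.toList.length := lower_length text
  rw [PySem.Str.find_eq]
  have hstart := start_eq (L := L) hn
  rw [hstart]
  by_cases hf : PySem.Chars.find L n.toList = -1
  · rw [if_neg (fun hc => hc hf), if_pos hf]
  · rw [if_pos hf, if_neg hf]
    -- index = find ≥ 0, with n a prefix at index
    have hz : PySem.Chars.findFrom L n.toList (↑(0:Nat)) = PySem.Chars.find L n.toList := by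
      simp
    obtain ⟨hr0, hrpre, _⟩ :=
      PySem.Chars.findFrom_natCast_spec L n.toList 0 (Nat.zero_le _) (by rw [hz]; exact hf)
    rw [hz] at hr0 hrpre
    set r := PySem.Chars.find L n.toList with hrdef
    have hr0' : (0:Int) ≤ r := by exact_mod_cast hr0
    set m : Nat := r.toNat + n.toList.length with hmdef
    have hm : m ≤ L.length := by
      have h1 : n.toList.length ≤ (L.drop r.toNat).length := hrpre.length_le
      have h2 : 0 < n.toList.length :=
        List.length_pos_iff.mpr (bNames_ne_nil n hn)
      rw [List.length_drop] at h1
      omega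
    have hcast : r + (↑n.toList.length : Int) = ↑m := by
      rw [hmdef]
      push_cast
      rw [Int.toNat_of_nonneg hr0']
    have hend := end_eq (L := L) m hm
    -- align A's findFrom calls and min default with the Chars-level statement
    simp only [PySem.Str.findFrom_eq, PySem.Str.len_eq]
    rw [← hlen]
    simp only [hcast]
    rw [hend]
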